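-- pv_equiv track=rewrite | github.com/chronicaria/MarchMadness | Code/ELO.py | are_teams_in_same_conf
-- ===== SOURCE A (Python) =====
-- def are_teams_in_same_conf(confs, team_a, team_b):
--     def find_conference(team):
--         for conf_name, teams in confs.items():
--             if team in teams:
--                 return conf_name
--         return None
--
--     conf_a = find_conference(team_a)
--     conf_b = find_conference(team_b)
--
--     return "Yes" if conf_a == conf_b and conf_a is not None else "No"
-- ===== SOURCE B (Python) =====
-- def are_teams_in_same_conf(confs, team_a, team_b):
--     index = {}
--     for conf_name, teams in confs.items():
--         for t in teams:
--             index.setdefault(t, conf_name)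
--     conf_a = index.get(team_a)
--     conf_b = index.get(team_b)
--     return "Yes" if conf_a is not None and conf_a == conf_b else "No"
-- ===== Notes on version B (the rewrite author's own statement) =====
-- stated objective: alternative
-- what changed: Replaces the two repeated scans over all conferences (one per team, via find_conference) with a single pass that builds a team-to-conference reverse index using setdefault (keeping the first conference, matching A's first-match semantics) followed by two O(1) lookups.
import Mathlib
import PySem

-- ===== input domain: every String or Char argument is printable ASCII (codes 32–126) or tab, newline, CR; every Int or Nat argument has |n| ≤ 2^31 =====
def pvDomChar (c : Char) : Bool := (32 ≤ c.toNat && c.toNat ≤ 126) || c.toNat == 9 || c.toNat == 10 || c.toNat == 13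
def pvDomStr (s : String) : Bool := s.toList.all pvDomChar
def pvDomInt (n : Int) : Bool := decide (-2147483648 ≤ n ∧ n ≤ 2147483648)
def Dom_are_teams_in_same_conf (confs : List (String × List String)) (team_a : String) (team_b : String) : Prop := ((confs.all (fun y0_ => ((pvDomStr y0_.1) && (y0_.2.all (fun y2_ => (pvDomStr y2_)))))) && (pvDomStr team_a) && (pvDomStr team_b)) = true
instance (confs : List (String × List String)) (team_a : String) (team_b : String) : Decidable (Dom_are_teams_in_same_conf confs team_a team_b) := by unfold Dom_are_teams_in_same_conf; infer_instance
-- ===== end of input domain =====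

-- B replaces A's two repeated scans (find_conference per team) by one pass that builds a
-- first-match team→conference reverse index (setdefault) plus two lookups: alternative decomposition.


-- ===== PORT A =====
-- inner helper find_conference: scan the conferences, return the first whose team list contains team
def pvFindConference (confs : List (String × List String)) (team : String) : Option String :=
  match confs with
  | [] => none
  | (conf_name, teams) :: rest =>
      if teams.contains team then some conf_name else pvFindConference rest team

def are_teams_in_same_conf (confs : List (String × List String)) (team_a : String) (team_b : String) : String :=
  let conf_a := pvFindConference confs team_a
  let conf_b := pvFindConference confs team_b
  if conf_a = conf_b ∧ conf_a ≠ none then "Yes" else "No"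

-- ===== PORT B =====
-- one pass over confs building the reverse index team → first conference (dict.setdefault)
def pvBuildIndex (confs : List (String × List String)) : PySem.Dict String String :=
  confs.foldl (fun d p => p.2.foldl (fun d t => d.setdefault t p.1) d) PySem.Dict.empty

def are_teams_in_same_conf_alt (confs : List (String × List String)) (team_a : String) (team_b : String) : String :=
  let index := pvBuildIndex confs
  let conf_a := index.get? team_a
  let conf_b := index.get? team_b
  if conf_a.isSome ∧ conf_a = conf_b then "Yes" else "No"

-- ===== PRECONDITION & SPEC =====
def Spec_are_teams_in_same_conf (confs : List (String × List String)) (team_a : String) (team_b : String) (out : String) : Prop := out = are_teams_in_same_conf_alt confs team_a team_b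
instance (confs : List (String × List String)) (team_a : String) (team_b : String) (out : String) : Decidable (Spec_are_teams_in_same_conf confs team_a team_b out) := by unfold Spec_are_teams_in_same_conf; infer_instance

-- ===== CLAIM (what is proved, stated in full; the proofs are below) =====
def Claim_equal_are_teams_in_same_conf : Prop := ∀ (confs : List (String × List String)) (team_a : String) (team_b : String), Dom_are_teams_in_same_conf confs team_a team_b → Spec_are_teams_in_same_conf confs team_a team_b (are_teams_in_same_conf confs team_a team_b)

-- ===== LEMMAS AND PROOFS =====

-- one conference's setdefault loop: keeps any existing binding, else binds t to c iff t is in teams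
theorem get?_setdefault_fold (teams : List String) (c : String) (d : PySem.Dict String String)
    (t : String) :
    (teams.foldl (fun d x => d.setdefault x c) d).get? t
      = (d.get? t).or (if t ∈ teams then some c else none) := by
  induction teams generalizing d with
  | nil => simp
  | cons x xs ih =>
    simp only [List.foldl_cons, ih]
    by_cases hx : x = t
    · subst hx
      rw [PySem.Dict.get?_setdefault_self]
      cases h : d.get? x <;> simp
    · have hne : t ≠ x := fun h => hx h.symm
      have hget : (d.setdefault x c).get? t = d.get? t := by
        by_cases hc : d.contains x = true
        · rw [PySem.Dict.setdefault_of_contains d c hc]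
        · rw [PySem.Dict.setdefault_of_not_contains d c (by simpa using hc)]
          exact PySem.Dict.get?_insert_of_ne d c hne
      rw [hget]
      simp [List.mem_cons, hne]

-- the whole index build: lookup in the built index is A's find_conference (first match)
theorem get?_buildIndex_fold (confs : List (String × List String))
    (d : PySem.Dict String String) (t : String) :
    (confs.foldl (fun d p => p.2.foldl (fun d x => d.setdefault x p.1) d) d).get? t
      = (d.get? t).or (pvFindConference confs t) := by
  induction confs generalizing d with
  | nil => simp [pvFindConference]
  | cons p ps ih =>
    simp only [List.foldl_cons, ih, get?_setdefault_fold]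
    rw [Option.or_assoc]
    cases p with
    | mk conf_name teams =>
      simp only [pvFindConference]
      by_cases h : t ∈ teams <;> simp [h]

theorem get?_buildIndex (confs : List (String × List String)) (t : String) :
    (pvBuildIndex confs).get? t = pvFindConference confs t := by
  simpa [pvBuildIndex] using get?_buildIndex_fold confs PySem.Dict.empty t

-- ===== VERDICT (by name: the statement is the Claim_ definition above) =====
theorem are_teams_in_same_conf_spec : Claim_equal_are_teams_in_same_conf := by
  intro confs team_a team_b _
  unfold Spec_are_teams_in_same_conf are_teams_in_same_conf are_teams_in_same_conf_alt
  simp only [get?_buildIndex]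
  cases ha : pvFindConference confs team_a <;> cases hb : pvFindConference confs team_b <;>
    simp [Option.isSome]
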